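-- pv_equiv track=rewrite | github.com/TehreemFatimaTF/1-HACKATHON-0- | src/learning/pattern_analyzer.py | _group_similar_tasks
-- ===== SOURCE A (Python) =====
-- from typing import Dict, List
--
-- def _group_similar_tasks(tasks: List[Dict]) -> Dict[str, List[Dict]]:
--     """Group similar tasks together"""
--     groups = {}
--
--     for task in tasks:
--         task_type = task.get("type", "unknown")
--         if task_type not in groups:
--             groups[task_type] = []
--         groups[task_type].append(task)
--
--     return groups
-- ===== SOURCE B (Python) =====
-- from typing import Dict, List
--
-- def _group_similar_tasks(tasks: List[Dict]) -> Dict[str, List[Dict]]: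
--     """Group similar tasks together"""
--     types = []
--     for task in tasks:
--         t = task.get("type", "unknown")
--         if t not in types:
--             types.append(t)
--     return {t: [task for task in tasks if task.get("type", "unknown") == t]
--             for t in types}
-- ===== Notes on version B (the rewrite author's own statement) =====
-- stated objective: alternative
-- what changed: Instead of one pass that builds the groups dict incrementally, B first collects the distinct task types in first-occurrence order and then builds each group by filtering the task list, so no dict is mutated during the scan.
import Mathlib
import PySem

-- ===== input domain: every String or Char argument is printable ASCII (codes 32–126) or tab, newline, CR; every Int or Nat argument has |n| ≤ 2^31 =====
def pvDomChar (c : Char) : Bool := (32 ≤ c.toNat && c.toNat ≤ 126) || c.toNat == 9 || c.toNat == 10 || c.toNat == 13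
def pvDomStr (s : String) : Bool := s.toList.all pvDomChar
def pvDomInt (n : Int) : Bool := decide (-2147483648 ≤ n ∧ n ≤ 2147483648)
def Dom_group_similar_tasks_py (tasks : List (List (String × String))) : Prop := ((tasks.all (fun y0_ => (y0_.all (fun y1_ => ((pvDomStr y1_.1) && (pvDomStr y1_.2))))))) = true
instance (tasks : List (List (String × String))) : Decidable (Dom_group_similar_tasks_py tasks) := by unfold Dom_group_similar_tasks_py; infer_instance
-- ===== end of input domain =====

-- B groups by a dedup-then-filter decomposition instead of A's incremental dict build; objective: alternative (same result, no speed claim).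

-- ===== PORT A =====
-- task.get("type", "unknown") on a dict argument (association list, first match wins)
def pvTaskType (t : List (String × String)) : String :=
  ((t.find? (fun p => p.1 == "type")).map Prod.snd).getD "unknown"

def group_similar_tasks_py (tasks : List (List (String × String))) : List (String × List (List (String × String))) :=
  (tasks.foldl (fun groups task =>
      let task_type := pvTaskType task
      let groups := if groups.contains task_type then groups else groups.insert task_type []
      groups.modify task_type [] (· ++ [task]))
    PySem.Dict.empty).items

-- ===== PORT B =====
def group_similar_tasks_py_alt (tasks : List (List (String × String))) : List (String × List (List (String × String))) :=
  let types := tasks.foldl (fun acc task =>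
      let t := pvTaskType task
      if t ∈ acc then acc else acc ++ [t]) []
  types.map (fun t => (t, tasks.filter (fun task => pvTaskType task == t)))

-- ===== PRECONDITION & SPEC =====
def Spec_group_similar_tasks_py (tasks : List (List (String × String))) (out : List (String × List (List (String × String)))) : Prop := out = group_similar_tasks_py_alt tasks
instance (tasks : List (List (String × String))) (out : List (String × List (List (String × String)))) : Decidable (Spec_group_similar_tasks_py tasks out) := by unfold Spec_group_similar_tasks_py; infer_instance

-- ===== CLAIM (what is proved, stated in full; the proofs are below) =====
def Claim_equal_group_similar_tasks_py : Prop := ∀ (tasks : List (List (String × String))), Dom_group_similar_tasks_py tasks → Spec_group_similar_tasks_py tasks (group_similar_tasks_py tasks)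

-- ===== LEMMAS AND PROOFS =====

-- A's loop body (ensure key, then append) is one `modify` with default []
theorem pv_step_eq (d : PySem.Dict String (List (List (String × String)))) (t : List (String × String)) :
    (let task_type := pvTaskType t
     let d' := if d.contains task_type then d else d.insert task_type []
     d'.modify task_type [] (· ++ [t])) = d.modify (pvTaskType t) [] (· ++ [t]) := by
  by_cases h : d.contains (pvTaskType t) = true
  · simp [h]
  · show (if d.contains (pvTaskType t) then d else d.insert (pvTaskType t) []).modify
        (pvTaskType t) [] (· ++ [t]) = _
    rw [if_neg h]
    have h1 : (d.insert (pvTaskType t) []).modify (pvTaskType t) [] (· ++ [t])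
        = (d.insert (pvTaskType t) []).insert (pvTaskType t)
            ((d.insert (pvTaskType t) []).getD (pvTaskType t) [] ++ [t]) :=
      PySem.Dict.ext_iff.mpr rfl
    have h2 : d.modify (pvTaskType t) [] (· ++ [t])
        = d.insert (pvTaskType t) (d.getD (pvTaskType t) [] ++ [t]) :=
      PySem.Dict.ext_iff.mpr rfl
    rw [h1, h2, PySem.Dict.getD_insert_self, PySem.Dict.insert_insert_self,
        PySem.Dict.getD_of_not_contains d _ (by simpa using h)]

-- B's dedup loop is PySem.Set.ofList of the mapped keys
theorem pv_types_eq (tasks : List (List (String × String))) :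
    tasks.foldl (fun acc task =>
        let t := pvTaskType task
        if t ∈ acc then acc else acc ++ [t]) []
      = PySem.Set.ofList (tasks.map pvTaskType) := by
  rw [PySem.Set.ofList_eq_foldl, List.foldl_map]
  apply PySem.List.foldl_congr_mem
  intro acc x _
  simp [PySem.Set.add]

theorem group_similar_tasks_py_eq (tasks : List (List (String × String))) :
    group_similar_tasks_py tasks = group_similar_tasks_py_alt tasks := by
  unfold group_similar_tasks_py group_similar_tasks_py_alt
  rw [pv_types_eq]
  have hfold : tasks.foldl (fun groups task =>
      let task_type := pvTaskType task
      let groups := if groups.contains task_type then groups else groups.insert task_type []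
      groups.modify task_type [] (· ++ [task])) PySem.Dict.empty
      = tasks.foldl (fun d t => d.modify (pvTaskType t) [] (· ++ [t])) PySem.Dict.empty := by
    apply PySem.List.foldl_congr_mem
    intro d t _; exact pv_step_eq d t
  rw [hfold]
  set d := tasks.foldl (fun d t => d.modify (pvTaskType t) [] (· ++ [t])) PySem.Dict.empty with hd
  have hpairs : d = (tasks.map (fun t => (pvTaskType t, t))).foldl
      (fun d p => d.modify p.1 [] (· ++ [p.2])) PySem.Dict.empty := by
    rw [hd, List.foldl_map]
  have hnd : d.keys.Nodup := by
    rw [hpairs]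
    exact PySem.Dict.nodup_keys_foldl_modify_key _ Prod.fst [] _ _ PySem.Dict.nodup_keys_empty
  have hkeys : d.keys = PySem.Set.ofList (tasks.map pvTaskType) := by
    rw [hpairs, PySem.Dict.keys_foldl_modify_key]
    simp [PySem.Set.update, PySem.Dict.keys_empty, List.map_map]
    rfl
  rw [PySem.Dict.items_eq_map_keys d hnd [], hkeys]
  apply List.map_congr_left
  intro k _
  congr 1
  rw [hpairs, PySem.Dict.getD_foldl_modify_append, PySem.Dict.getD_empty, List.filter_map]
  simp [Function.comp_def]

-- ===== VERDICT (by name: the statement is the Claim_ definition above) =====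
theorem group_similar_tasks_py_spec : Claim_equal_group_similar_tasks_py := by
  intro tasks _
  unfold Spec_group_similar_tasks_py
  exact group_similar_tasks_py_eq tasks
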